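-- pv_equiv track=rewrite | github.com/arrzdev/Projeto1_FP | night.py | obter_pin
-- ===== SOURCE A (Python) =====
-- def obter_posicao(movement: str, position: int):
--
--     C_limit = (1,2,3)
--     B_limit = (7,8,9)
--     E_limit = (1,4,7)
--     D_limit = (3,6,9)
--
--     #CBED
--
--     if movement == "C" and position not in C_limit:
--         new_position = position - 3
--     elif movement == "B" and position not in B_limit:
--         new_position = position + 3
--     elif movement == "E" and position not in E_limit:
--         new_position = position - 1
--     elif movement == "D" and position not in D_limit:
--         new_position = position + 1
--     else:
--         new_position = position
--
--     return new_position
--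
-- def obter_digito(sequence: str, position: int):
--     for movement in sequence:
--         position = obter_posicao(movement, position)
--
--     return position
--
-- def obter_pin(sequences: tuple):
--
--     #check type and lenght of the argument "sequences"
--     if type(sequences) != tuple or len(sequences) < 4 or len(sequences) > 10:
--         raise ValueError("obter_pin: argumento invalido")
--
--     valid_movements = ("C","B","E","D")
--
--     #check if the input follow every rule... (CBDE)
--     for sequence in sequences:
--         if sequence == "":
--             raise ValueError("obter_pin: argumento invalido")
--         else:
--             for movement in sequence:
--                 if movement not in valid_movements:
--                     raise ValueError("obter_pin: argumento invalido")
--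
--     #initialize an empty tuple to save the pin
--     pin = ()
--
--     #initialize the position variable with 5 (middle)
--     position = 5
--
--     #loop through the sequence
--     for sequence in sequences:
--         #update the position with the new position
--         position = obter_digito(sequence, position)
--
--         #create a tuple containing the digito
--         digito = (position,)
--
--         #concatenate the two tuples
--         pin += digito
--
--     #return the pin
--     return pin
-- ===== SOURCE B (Python) =====
-- def obter_pin(sequences: tuple):
--     # same validation as the spec: tuple of 4..10 non-empty CBED-only strings
--     if type(sequences) != tuple or len(sequences) < 4 or len(sequences) > 10:
--         raise ValueError("obter_pin: argumento invalido")
--     for sequence in sequences: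
--         if sequence == "" or any(m not in "CBED" for m in sequence):
--             raise ValueError("obter_pin: argumento invalido")
--
--     # keypad position as (row, col) coordinates, start at key 5 = (1, 1)
--     row, col = 1, 1
--     pin = []
--     for sequence in sequences:
--         for m in sequence:
--             if m == "C":
--                 row = max(row - 1, 0)
--             elif m == "B":
--                 row = min(row + 1, 2)
--             elif m == "E":
--                 col = max(col - 1, 0)
--             else:
--                 col = min(col + 1, 2)
--         pin.append(row * 3 + col + 1)
--     return tuple(pin)
-- ===== Notes on version B (the rewrite author's own statement) =====
-- stated objective: idiomatic
-- what changed: B replaces the flat 1-9 position tested against per-direction boundary tuples by (row, col) coordinates with each move a clamp into [0,2], recombining as row*3+col+1, and collapses the helper functions into one pass with a list accumulator.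
import Mathlib
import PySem

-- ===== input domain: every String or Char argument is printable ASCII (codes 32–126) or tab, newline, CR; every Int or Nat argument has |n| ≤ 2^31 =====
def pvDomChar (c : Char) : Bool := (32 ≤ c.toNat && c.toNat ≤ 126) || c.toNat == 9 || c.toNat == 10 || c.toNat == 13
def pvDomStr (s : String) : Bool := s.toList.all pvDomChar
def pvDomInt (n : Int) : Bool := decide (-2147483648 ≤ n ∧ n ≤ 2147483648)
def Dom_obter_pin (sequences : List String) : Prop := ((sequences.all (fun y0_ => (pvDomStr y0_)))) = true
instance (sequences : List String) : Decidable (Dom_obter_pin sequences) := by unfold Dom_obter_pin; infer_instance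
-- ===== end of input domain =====

-- B replaces the flat 1-9 keypad position tested against boundary tuples by (row,col)
-- coordinates with clamped moves, recombined as row*3+col+1 (objective: idiomatic).


-- ===== PORT A =====
def obter_posicao (movement : Char) (position : Int) : Int :=
  let C_limit : List Int := [1, 2, 3]
  let B_limit : List Int := [7, 8, 9]
  let E_limit : List Int := [1, 4, 7]
  let D_limit : List Int := [3, 6, 9]
  if movement == 'C' && !(C_limit.contains position) then position - 3
  else if movement == 'B' && !(B_limit.contains position) then position + 3
  else if movement == 'E' && !(E_limit.contains position) then position - 1
  else if movement == 'D' && !(D_limit.contains position) then position + 1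
  else position

def obter_digito (sequence : String) (position : Int) : Int :=
  sequence.toList.foldl (fun p m => obter_posicao m p) position

def obter_pin_main (sequences : List String) : List Int :=
  (sequences.foldl
    (fun (acc : List Int × Int) sequence =>
      let position := obter_digito sequence acc.2
      (acc.1 ++ [position], position))
    ([], 5)).1

-- where the Python raises ValueError the port returns []; Pre_ excludes exactly those inputs
def obter_pin (sequences : List String) : List Int :=
  if sequences.length < 4 || sequences.length > 10 then []
  else if sequences.any (fun s =>
      s == "" || s.toList.any (fun m => !(['C', 'B', 'E', 'D'].contains m))) then []
  else obter_pin_main sequences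

-- ===== PORT B =====
def pvMove (rc : Int × Int) (m : Char) : Int × Int :=
  if m == 'C' then (max (rc.1 - 1) 0, rc.2)
  else if m == 'B' then (min (rc.1 + 1) 2, rc.2)
  else if m == 'E' then (rc.1, max (rc.2 - 1) 0)
  else (rc.1, min (rc.2 + 1) 2)

def obter_pin_alt_main (sequences : List String) : List Int :=
  (sequences.foldl
    (fun (acc : List Int × (Int × Int)) s =>
      let rc := s.toList.foldl pvMove acc.2
      (acc.1 ++ [rc.1 * 3 + rc.2 + 1], rc))
    ([], (1, 1))).1

-- where the Python raises ValueError the port returns []; Pre_ excludes exactly those inputs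
def obter_pin_alt (sequences : List String) : List Int :=
  if sequences.length < 4 || sequences.length > 10 then []
  else if sequences.any (fun s =>
      s == "" || s.toList.any (fun m => !("CBED".toList.contains m))) then []
  else obter_pin_alt_main sequences

-- ===== PRECONDITION & SPEC =====
-- Pre_ excludes exactly the inputs on which the Python A raises ValueError:
-- wrong length, an empty sequence, or a movement outside "CBED".
def Pre_obter_pin (sequences : List String) : Prop :=
  (4 ≤ sequences.length && sequences.length ≤ 10 &&
    sequences.all (fun s =>
      !(s == "") && s.toList.all (fun m => (['C', 'B', 'E', 'D'] : List Char).contains m))) = true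
instance (sequences : List String) : Decidable (Pre_obter_pin sequences) := by
  unfold Pre_obter_pin; infer_instance
def pvWitness_obter_pin : List String := ["C", "B", "E", "D"]
def Spec_obter_pin (sequences : List String) (out : List Int) : Prop := out = obter_pin_alt sequences
instance (sequences : List String) (out : List Int) : Decidable (Spec_obter_pin sequences out) := by
  unfold Spec_obter_pin; infer_instance

-- ===== CLAIM (what is proved, stated in full; the proofs are below) =====
def Claim_equal_obter_pin : Prop := ∀ (sequences : List String), Dom_obter_pin sequences → Pre_obter_pin sequences → Spec_obter_pin sequences (obter_pin sequences)

-- ===== LEMMAS AND PROOFS =====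

-- the coordinate invariant relating the two ports' states
abbrev pvOk (rc : Int × Int) : Prop := 0 ≤ rc.1 ∧ rc.1 ≤ 2 ∧ 0 ≤ rc.2 ∧ rc.2 ≤ 2

theorem pvMove_step (rc : Int × Int) (hok : pvOk rc) (m : Char)
    (hm : m ∈ (['C', 'B', 'E', 'D'] : List Char)) :
    obter_posicao m (rc.1 * 3 + rc.2 + 1) = (pvMove rc m).1 * 3 + (pvMove rc m).2 + 1 ∧
      pvOk (pvMove rc m) := by
  obtain ⟨r, c⟩ := rc
  obtain ⟨h1, h2, h3, h4⟩ := hok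
  simp only at h1 h2 h3 h4
  interval_cases r <;> interval_cases c <;>
    simp only [List.mem_cons, List.not_mem_nil, or_false] at hm <;>
    rcases hm with rfl | rfl | rfl | rfl <;> decide

theorem pvDigito_step (l : List Char) (rc : Int × Int) (hok : pvOk rc)
    (hv : ∀ m ∈ l, m ∈ (['C', 'B', 'E', 'D'] : List Char)) :
    l.foldl (fun p m => obter_posicao m p) (rc.1 * 3 + rc.2 + 1) =
        (l.foldl pvMove rc).1 * 3 + (l.foldl pvMove rc).2 + 1 ∧
      pvOk (l.foldl pvMove rc) := by
  induction l generalizing rc with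
  | nil => exact ⟨rfl, hok⟩
  | cons m l ih =>
    have hm := hv m (List.mem_cons_self ..)
    have hstep := pvMove_step rc hok m hm
    simp only [List.foldl_cons, hstep.1]
    exact ih (pvMove rc m) hstep.2 (fun x hx => hv x (List.mem_cons_of_mem _ hx))

theorem pvMain_eq (sequences : List String) (acc : List Int) (rc : Int × Int) (hok : pvOk rc)
    (hv : ∀ s ∈ sequences, ∀ m ∈ s.toList, m ∈ (['C', 'B', 'E', 'D'] : List Char)) :
    (sequences.foldl
        (fun (acc : List Int × Int) sequence =>
          let position := obter_digito sequence acc.2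
          (acc.1 ++ [position], position))
        (acc, rc.1 * 3 + rc.2 + 1)).1 =
      (sequences.foldl
        (fun (acc : List Int × (Int × Int)) s =>
          let rc := s.toList.foldl pvMove acc.2
          (acc.1 ++ [rc.1 * 3 + rc.2 + 1], rc))
        (acc, rc)).1 := by
  induction sequences generalizing acc rc with
  | nil => rfl
  | cons s rest ih =>
    have hs := hv s (List.mem_cons_self ..)
    have hd := pvDigito_step s.toList rc hok hs
    simp only [List.foldl_cons, obter_digito, hd.1]
    exact ih _ _ hd.2 (fun x hx => hv x (List.mem_cons_of_mem _ hx))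

theorem pre_guards (sequences : List String) (h : Pre_obter_pin sequences) :
    (sequences.length < 4 || sequences.length > 10) = false ∧
      sequences.any (fun s =>
        s == "" || s.toList.any (fun m => !(['C', 'B', 'E', 'D'].contains m))) = false ∧
      ∀ s ∈ sequences, ∀ m ∈ s.toList, m ∈ (['C', 'B', 'E', 'D'] : List Char) := by
  unfold Pre_obter_pin at h
  simp only [Bool.and_eq_true, List.all_eq_true, Bool.not_eq_true', beq_eq_false_iff_ne,
    decide_eq_true_eq, List.contains_eq_mem] at h
  obtain ⟨⟨h1, h2⟩, h3⟩ := h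
  refine ⟨?_, ?_, ?_⟩
  · simp only [Bool.or_eq_false_iff, decide_eq_false_iff_not, not_lt, gt_iff_lt]
    omega
  · rw [List.any_eq_false]
    intro s hs
    obtain ⟨hne, hall⟩ := h3 s hs
    rw [Bool.not_eq_true]
    refine Bool.or_eq_false_iff.mpr ⟨beq_eq_false_iff_ne.mpr hne, ?_⟩
    rw [List.any_eq_false]
    intro m hm
    simp [hall m hm]
  · exact fun s hs m hm => (h3 s hs).2 m hm

-- ===== VERDICT (by name: the statement is the Claim_ definition above) =====
theorem obter_pin_spec : Claim_equal_obter_pin := by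
  intro sequences _ hpre
  obtain ⟨hg1, hg2, hv⟩ := pre_guards sequences hpre
  show obter_pin sequences = obter_pin_alt sequences
  have hg2' : sequences.any (fun s =>
      s == "" || s.toList.any (fun m => !("CBED".toList.contains m))) = false := by
    simpa using hg2
  rw [obter_pin, obter_pin_alt, hg1, hg2, hg2']
  simp only [Bool.false_eq_true, if_false]
  have := pvMain_eq sequences [] (1, 1) (by constructor <;> norm_num) hv
  simpa [obter_pin_main, obter_pin_alt_main] using this
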